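-- pv_equiv track=rewrite | github.com/pypi-data/pypi-mirror-3 | packages/genepidgin/genepidgin-1.1.1.tar.gz/genepidgin-1.1.1/genepidgin/scorer.py | simpleBin
-- ===== SOURCE A (Python) =====
-- def simpleBin(numbers, categories):
--     categories.sort()
--     counts = {}
--     for number in numbers:
--         for cat in categories:
--             if number <= cat:
--                 counts[cat] = counts.setdefault(cat, 0) + 1
--                 break
--     return counts
-- ===== SOURCE B (Python) =====
-- def _firstGE(cats, x, lo, hi):
--     # recursive binary search: first index i in [lo, hi) with cats[i] >= x (hi if none)
--     if lo >= hi: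
--         return lo
--     mid = (lo + hi) // 2
--     if cats[mid] < x:
--         return _firstGE(cats, x, mid + 1, hi)
--     return _firstGE(cats, x, lo, mid)
--
--
-- def simpleBin(numbers, categories):
--     # Sorts `categories` in place, same side effect as the original.
--     categories.sort()
--     k = len(categories)
--     bins = []
--     for number in numbers:
--         i = _firstGE(categories, number, 0, k)
--         if i < k:
--             bins.append(categories[i])
--     counts = {}
--     for c in bins:
--         counts[c] = counts.get(c, 0) + 1
--     return counts
-- ===== Notes on version B (the rewrite author's own statement) =====
-- stated objective: faster
-- what changed: Two staged passes instead of A's single pass with a nested linear scan: first a recursive binary search maps each number to its bin (first category >= number), collecting the bins in a list, then a separate counting pass builds the dict; A's inner scan-with-break and setdefault disappear.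
import Mathlib
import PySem

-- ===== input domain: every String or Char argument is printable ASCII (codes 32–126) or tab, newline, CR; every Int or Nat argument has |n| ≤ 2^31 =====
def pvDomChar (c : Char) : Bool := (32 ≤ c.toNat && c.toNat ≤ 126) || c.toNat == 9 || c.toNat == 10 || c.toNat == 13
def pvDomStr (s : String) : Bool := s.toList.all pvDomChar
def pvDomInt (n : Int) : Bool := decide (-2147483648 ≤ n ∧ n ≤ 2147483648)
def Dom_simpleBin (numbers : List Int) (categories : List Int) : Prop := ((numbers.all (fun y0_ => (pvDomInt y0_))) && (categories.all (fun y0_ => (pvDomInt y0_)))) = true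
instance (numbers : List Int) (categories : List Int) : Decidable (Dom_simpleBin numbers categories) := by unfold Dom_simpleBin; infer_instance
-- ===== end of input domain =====

-- B replaces A's single pass with a nested linear scan by two staged passes: a recursive
-- binary search maps each number to its bin, then a separate pass counts the bins.
-- Both A and B sort `categories` in place (same side effect); the equivalence proved is
-- about the RETURN value (the dict, as its items list).

-- ===== PORT A =====
-- inner `for cat in categories: if number <= cat: counts[cat] = counts.setdefault(cat, 0) + 1; break`
def simpleBinScan (d : PySem.Dict Int Int) (number : Int) : List Int → PySem.Dict Int Int
  | [] => d
  | cat :: rest =>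
      if number ≤ cat then (d.setdefault cat 0).insert cat (d.getD cat 0 + 1)
      else simpleBinScan d number rest

def simpleBin (numbers : List Int) (categories : List Int) : List (Int × Int) :=
  let cats := PySem.List.sorted categories (fun x => x) false
  let counts := numbers.foldl (fun d number => simpleBinScan d number cats) PySem.Dict.empty
  counts.items

-- ===== PORT B =====
-- Source B's `_firstGE`: recursive binary search, first index in [lo, hi) with cats[i] >= x
-- (cats[mid] always in range when called with hi ≤ len, so getD is exact here)
def firstGE (cats : List Int) (x : Int) (lo hi : Nat) : Nat :=
  if _h : lo < hi then
    let mid := (lo + hi) / 2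
    if cats.getD mid 0 < x then firstGE cats x (mid + 1) hi
    else firstGE cats x lo mid
  else lo
termination_by hi - lo
decreasing_by all_goals omega

def simpleBin_alt (numbers : List Int) (categories : List Int) : List (Int × Int) :=
  let cats := PySem.List.sorted categories (fun x => x) false
  let k := cats.length
  -- pass 1: `bins.append(categories[i])` for each number whose bin exists
  let bins := numbers.foldl (fun acc number =>
      let i := firstGE cats number 0 k
      if i < k then acc ++ [cats.getD i 0] else acc) []
  -- pass 2: count the bins
  let counts := bins.foldl (fun d c => d.insert c (d.getD c 0 + 1)) PySem.Dict.empty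
  counts.items

-- ===== PRECONDITION & SPEC =====
def Spec_simpleBin (numbers : List Int) (categories : List Int) (out : List (Int × Int)) : Prop := out = simpleBin_alt numbers categories
instance (numbers : List Int) (categories : List Int) (out : List (Int × Int)) : Decidable (Spec_simpleBin numbers categories out) := by unfold Spec_simpleBin; infer_instance

-- ===== CLAIM (what is proved, stated in full; the proofs are below) =====
def Claim_equal_simpleBin : Prop := ∀ (numbers : List Int) (categories : List Int), Dom_simpleBin numbers categories → Spec_simpleBin numbers categories (simpleBin numbers categories)

-- ===== LEMMAS AND PROOFS =====

-- setdefault-then-overwrite is a plain insert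
theorem setdefault_insert (d : PySem.Dict Int Int) (k : Int) (v w : Int) :
    (d.setdefault k v).insert k w = d.insert k w := by
  apply PySem.Dict.ext
  by_cases h : d.contains k = true
  · simp [PySem.Dict.setdefault, h]
  · have h' : d.contains k = false := by simpa using h
    have hany : (d.items.any fun p => p.1 == k) = false := by
      simpa [PySem.Dict.contains] using h'
    have hnone : ∀ p ∈ d.items, (p.1 == k) = false := by
      simpa using List.any_eq_false.mp hany
    have hset : (d.setdefault k v) = PySem.Dict.mk (d.items ++ [(k, v)]) := by
      simp [PySem.Dict.setdefault, h']
    rw [hset, PySem.Dict.items_insert_of_contains _ _ (by simp [PySem.Dict.contains]),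
        PySem.Dict.items_insert_of_not_contains _ _ h']
    simp only [List.map_append, List.map_cons, List.map_nil, beq_self_eq_true, if_pos]
    congr 1
    conv_rhs => rw [← List.map_id d.items]
    exact List.map_congr_left (fun p hp => by simp [hnone p hp])

-- A's linear scan applies the update at the first index i with x ≤ cs[i] (none: unchanged)
theorem scan_first (x : Int) (d : PySem.Dict Int Int) (cs : List Int) (i : Nat)
    (hle : i ≤ cs.length)
    (hlt : ∀ (j : Nat) (hj : j < cs.length), j < i → cs[j] < x)
    (hge : ∀ (hj : i < cs.length), x ≤ cs[i]) :
    simpleBinScan d x cs =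
      if h : i < cs.length then (d.setdefault cs[i] 0).insert cs[i] (d.getD cs[i] 0 + 1) else d := by
  induction cs generalizing i with
  | nil => simp at hle; subst hle; simp [simpleBinScan]
  | cons c rest ih =>
    by_cases hxc : x ≤ c
    · have hi0 : i = 0 := by
        by_contra hne
        have : c < x := hlt 0 (by simp) (Nat.pos_of_ne_zero hne)
        omega
      subst hi0
      simp [simpleBinScan, hxc]
    · have hcx : c < x := by omega
      have hi0 : i ≠ 0 := by
        intro h0; subst h0
        exact hxc (hge (by simp))
      obtain ⟨i', rfl⟩ := Nat.exists_eq_succ_of_ne_zero hi0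
      have := ih i' (by simpa using hle)
        (fun j hj hji => by
          have := hlt (j + 1) (by simpa using Nat.succ_lt_succ hj) (Nat.succ_lt_succ hji)
          simpa using this)
        (fun hj => by
          have := hge (by simpa using Nat.succ_lt_succ hj)
          simpa using this)
      simp only [simpleBinScan, if_neg hxc, this]
      simp

-- unfolding firstGE one step
theorem firstGE_step (cats : List Int) (x : Int) (lo hi : Nat) (h : lo < hi) :
    firstGE cats x lo hi =
      if cats.getD ((lo + hi) / 2) 0 < x then firstGE cats x ((lo + hi) / 2 + 1) hi
      else firstGE cats x lo ((lo + hi) / 2) := by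
  rw [firstGE]
  simp only [dif_pos h]

theorem firstGE_stop (cats : List Int) (x : Int) (lo hi : Nat) (h : ¬ lo < hi) :
    firstGE cats x lo hi = lo := by
  rw [firstGE, dif_neg h]

-- firstGE on a sorted list computes the first index with x ≤ cats[i]
theorem firstGE_spec_aux (cats : List Int) (hs : cats.Pairwise (· ≤ ·)) (x : Int) :
    ∀ (fuel lo hi : Nat), hi - lo ≤ fuel → lo ≤ hi → hi ≤ cats.length →
    (∀ (j : Nat) (hj : j < cats.length), j < lo → cats[j] < x) →
    (∀ (j : Nat) (hj : j < cats.length), hi ≤ j → x ≤ cats[j]) →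
    firstGE cats x lo hi ≤ cats.length ∧
    (∀ (j : Nat) (hj : j < cats.length), j < firstGE cats x lo hi → cats[j] < x) ∧
    (∀ (h : firstGE cats x lo hi < cats.length), x ≤ cats[firstGE cats x lo hi]) := by
  have hmono : ∀ (i j : Nat) (hi : i < cats.length) (hj : j < cats.length),
      i ≤ j → cats[i] ≤ cats[j] := by
    intro i j hi hj hij
    rcases Nat.lt_or_ge i j with h | h
    · exact (List.pairwise_iff_getElem.mp hs) i j hi hj h
    · have : i = j := by omega
      subst this; exact le_refl _
  intro fuel
  induction fuel with
  | zero =>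
    intro lo hi h0 h1 h2 hlo hhi
    rw [firstGE_stop cats x lo hi (by omega)]
    exact ⟨by omega, hlo, fun h => hhi lo h (by omega)⟩
  | succ n ih =>
    intro lo hi hn h1 h2 hlo hhi
    by_cases hlh : lo < hi
    · rw [firstGE_step cats x lo hi hlh]
      have hmlt : (lo + hi) / 2 < cats.length := by omega
      rw [List.getD_eq_getElem cats 0 hmlt]
      by_cases hc : cats[(lo + hi) / 2] < x
      · rw [if_pos hc]
        exact ih ((lo + hi) / 2 + 1) hi (by omega) (by omega) h2
          (fun j hj hjlt => by
            rcases Nat.lt_or_ge j lo with h' | h'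
            · exact hlo j hj h'
            · exact lt_of_le_of_lt (hmono j ((lo + hi) / 2) hj hmlt (by omega)) hc)
          hhi
      · rw [if_neg hc]
        push_neg at hc
        exact ih lo ((lo + hi) / 2) (by omega) (by omega) (by omega) hlo
          (fun j hj hjge => le_trans hc (hmono ((lo + hi) / 2) j hmlt hj hjge))
    · rw [firstGE_stop cats x lo hi hlh]
      exact ⟨by omega, hlo, fun h => hhi lo h (by omega)⟩

theorem firstGE_spec (cats : List Int) (hs : cats.Pairwise (· ≤ ·)) (x : Int) :
    firstGE cats x 0 cats.length ≤ cats.length ∧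
    (∀ (j : Nat) (hj : j < cats.length), j < firstGE cats x 0 cats.length → cats[j] < x) ∧
    (∀ (h : firstGE cats x 0 cats.length < cats.length), x ≤ cats[firstGE cats x 0 cats.length]) :=
  firstGE_spec_aux cats hs x cats.length 0 cats.length (by omega) (by omega) (le_refl _)
    (fun j hj hjlt => by omega) (fun j hj hle => by omega)

-- B's per-number step equals A's scan, on a sorted list
theorem step_eq (cats : List Int) (hs : cats.Pairwise (· ≤ ·)) (d : PySem.Dict Int Int) (x : Int) :
    simpleBinScan d x cats =
      (if firstGE cats x 0 cats.length < cats.length then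
        d.insert (cats.getD (firstGE cats x 0 cats.length) 0)
          (d.getD (cats.getD (firstGE cats x 0 cats.length) 0) 0 + 1)
      else d) := by
  obtain ⟨h1, h2, h3⟩ := firstGE_spec cats hs x
  rw [scan_first x d cats (firstGE cats x 0 cats.length) h1 h2 h3]
  split
  · next h => rw [List.getD_eq_getElem cats 0 h, setdefault_insert]
  · next h => rfl

-- the two folds agree: A's one-pass fold = B's count-fold over the bins list
theorem fold_eq (cats : List Int) (hs : cats.Pairwise (· ≤ ·)) :
    ∀ (numbers : List Int) (d : PySem.Dict Int Int),
    numbers.foldl (fun d number => simpleBinScan d number cats) d =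
      ((numbers.filter (fun n => firstGE cats n 0 cats.length < cats.length)).map
        (fun n => cats.getD (firstGE cats n 0 cats.length) 0)).foldl
        (fun d c => d.insert c (d.getD c 0 + 1)) d := by
  intro numbers
  induction numbers with
  | nil => intro d; rfl
  | cons n ns ih =>
    intro d
    simp only [List.foldl_cons, List.filter_cons]
    rw [step_eq cats hs d n]
    by_cases h : firstGE cats n 0 cats.length < cats.length
    · rw [if_pos h, if_pos (by simpa using h), List.map_cons, List.foldl_cons]
      exact ih _
    · rw [if_neg h, if_neg (by simpa using h)]
      exact ih _

-- ===== VERDICT (by name: the statement is the Claim_ definition above) =====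
theorem simpleBin_spec : Claim_equal_simpleBin := by
  intro numbers categories _
  unfold Spec_simpleBin simpleBin simpleBin_alt
  dsimp only
  have hs : (PySem.List.sorted categories (fun x => x) false).Pairwise (· ≤ ·) := by
    simpa using PySem.List.sorted_pairwise categories (fun x => x)
  rw [PySem.List.foldl_append_ite
      (p := fun n => firstGE (PySem.List.sorted categories (fun x => x) false) n 0
        (PySem.List.sorted categories (fun x => x) false).length <
        (PySem.List.sorted categories (fun x => x) false).length)]
  rw [fold_eq _ hs]
  simp
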